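-- pv_equiv track=rewrite | github.com/ChenHong30/Beacon_Multiturn | eval/gsm8k_interference/gsm8k_interference_utils.py | slice_conversation_by_rounds
-- ===== SOURCE A (Python) =====
-- from typing import Any, Dict, List, Optional, Tuple
--
-- def normalize_role(role: Optional[str]) -> str:
--     role = (role or "user").lower()
--     if role not in {"user", "assistant", "system"}:
--         return "user"
--     return role
--
-- def slice_conversation_by_rounds(
--     conversation: List[Dict[str, Any]],
--     max_rounds: int,
-- ) -> List[Dict[str, Any]]:
--     if max_rounds <= 0:
--         return []
--
--     result: List[Dict[str, Any]] = []
--     rounds = 0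
--     prev_role: Optional[str] = None
--
--     for msg in conversation:
--         if not isinstance(msg, dict):
--             continue
--         role = normalize_role(msg.get("role"))
--         if role == "system":
--             continue
--         content = msg.get("content")
--         result.append({"role": role, "content": content})
--         if prev_role == "user" and role == "assistant":
--             rounds += 1
--             if rounds >= max_rounds:
--                 break
--         prev_role = role
--
--     return result
-- ===== SOURCE B (Python) =====
-- from typing import Any, Dict, List, Optional
--
--
-- def normalize_role(role: Optional[str]) -> str:
--     role = (role or "user").lower()
--     if role not in {"user", "assistant", "system"}:
--         return "user"
--     return role
--
--
-- def slice_conversation_by_rounds(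
--     conversation: List[Dict[str, Any]],
--     max_rounds: int,
-- ) -> List[Dict[str, Any]]:
--     if max_rounds <= 0:
--         return []
--
--     # Pass 1: normalize and drop non-dict / system messages.
--     processed = [
--         {"role": normalize_role(m.get("role")), "content": m.get("content")}
--         for m in conversation
--         if isinstance(m, dict) and normalize_role(m.get("role")) != "system"
--     ]
--
--     # Pass 2: locate the assistant message completing round max_rounds.
--     cutoff = None
--     rounds = 0
--     prev = None
--     for i, m in enumerate(processed):
--         r = m["role"]
--         if prev == "user" and r == "assistant":
--             rounds += 1
--             if rounds >= max_rounds: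
--                 cutoff = i
--                 break
--         prev = r
--
--     return processed if cutoff is None else processed[: cutoff + 1]
-- ===== Notes on version B (the rewrite author's own statement) =====
-- stated objective: alternative
-- what changed: Replaces A's single early-exit accumulator loop with a build-then-locate-then-slice shape: one filter/normalize pass builds the full processed list, a second pass finds the index of the assistant message completing the max_rounds-th round, and the result is a slice of the processed list.
import Mathlib
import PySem

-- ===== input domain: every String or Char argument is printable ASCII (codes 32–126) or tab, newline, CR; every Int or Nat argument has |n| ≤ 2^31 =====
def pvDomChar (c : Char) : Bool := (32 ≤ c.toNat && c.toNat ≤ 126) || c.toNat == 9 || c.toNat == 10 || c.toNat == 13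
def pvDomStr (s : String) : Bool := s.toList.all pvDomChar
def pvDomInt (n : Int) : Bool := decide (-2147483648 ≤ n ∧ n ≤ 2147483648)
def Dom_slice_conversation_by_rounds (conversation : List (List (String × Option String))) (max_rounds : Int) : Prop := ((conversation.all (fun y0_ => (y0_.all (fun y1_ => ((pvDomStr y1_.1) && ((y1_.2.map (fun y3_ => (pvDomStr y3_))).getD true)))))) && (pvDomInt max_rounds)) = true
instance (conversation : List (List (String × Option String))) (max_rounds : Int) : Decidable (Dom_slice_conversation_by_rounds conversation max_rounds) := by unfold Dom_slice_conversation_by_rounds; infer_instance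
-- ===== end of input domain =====

-- B replaces A's single early-exit accumulator loop with a build-then-locate-then-slice
-- decomposition (objective: alternative); same O(n) cost, return values proved equal.

-- ===== PORT A =====
-- helper normalize_role (shared module helper, used verbatim by both A and B):
-- 'role or "user"' treats None and "" as falsy.
def pvNormRole (r : Option String) : String :=
  let role := match r with | none => "user" | some s => if s = "" then "user" else s
  let role := PySem.Str.lower role
  if ¬ (role = "user" ∨ role = "assistant" ∨ role = "system") then "user" else role

-- msg.get(k) on a dict value that may itself be None: first-match lookup, flattened.
def pvGetKey (msg : List (String × Option String)) (k : String) : Option String :=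
  (msg.lookup k).join

-- A's for-loop with its early 'break', as structural recursion over the same state
-- (result built by cons instead of append; rounds, prev_role carried unchanged).
-- The 'isinstance(msg, dict)' guard is always true under the type convention.
def pvALoop (maxRounds : Int) : List (List (String × Option String)) → Int → Option String →
    List (List (String × Option String))
  | [], _, _ => []
  | msg :: rest, rounds, prevRole =>
    let role := pvNormRole (pvGetKey msg "role")
    if role = "system" then pvALoop maxRounds rest rounds prevRole
    else
      let content := pvGetKey msg "content"
      let entry : List (String × Option String) := [("role", some role), ("content", content)]
      if prevRole = some "user" ∧ role = "assistant" then
        if rounds + 1 ≥ maxRounds then [entry]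
        else entry :: pvALoop maxRounds rest (rounds + 1) (some role)
      else entry :: pvALoop maxRounds rest rounds (some role)

def slice_conversation_by_rounds (conversation : List (List (String × Option String))) (max_rounds : Int) : List (List (String × Option String)) :=
  if max_rounds ≤ 0 then [] else pvALoop max_rounds conversation 0 none

-- ===== PORT B =====
-- pass 1 of Source B: the normalize/filter comprehension.
def pvProcessed (conversation : List (List (String × Option String))) : List (List (String × Option String)) :=
  conversation.filterMap (fun m =>
    let role := pvNormRole (pvGetKey m "role")
    if role = "system" then none
    else some [("role", some role), ("content", pvGetKey m "content")])

-- pass 2 of Source B: the enumerate loop locating the cutoff index ('.map (· + 1)' records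
-- the index that 'enumerate' counts in Python).
def pvFindCut (maxRounds : Int) : List (List (String × Option String)) → Int → Option String → Option Nat
  | [], _, _ => none
  | m :: rest, rounds, prev =>
    let r := pvGetKey m "role"
    if prev = some "user" ∧ r = some "assistant" then
      if rounds + 1 ≥ maxRounds then some 0
      else (pvFindCut maxRounds rest (rounds + 1) r).map (· + 1)
    else (pvFindCut maxRounds rest rounds r).map (· + 1)

def slice_conversation_by_rounds_alt (conversation : List (List (String × Option String))) (max_rounds : Int) : List (List (String × Option String)) :=
  if max_rounds ≤ 0 then []
  else
    let processed := pvProcessed conversation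
    match pvFindCut max_rounds processed 0 none with
    | none => processed
    | some i => processed.take (i + 1)

-- ===== PRECONDITION & SPEC =====
def Spec_slice_conversation_by_rounds (conversation : List (List (String × Option String))) (max_rounds : Int) (out : List (List (String × Option String))) : Prop := out = slice_conversation_by_rounds_alt conversation max_rounds
instance (conversation : List (List (String × Option String))) (max_rounds : Int) (out : List (List (String × Option String))) : Decidable (Spec_slice_conversation_by_rounds conversation max_rounds out) := by unfold Spec_slice_conversation_by_rounds; infer_instance

-- ===== CLAIM (what is proved, stated in full; the proofs are below) =====
def Claim_equal_slice_conversation_by_rounds : Prop := ∀ (conversation : List (List (String × Option String))) (max_rounds : Int), Dom_slice_conversation_by_rounds conversation max_rounds → Spec_slice_conversation_by_rounds conversation max_rounds (slice_conversation_by_rounds conversation max_rounds)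

-- ===== LEMMAS AND PROOFS =====

theorem pvGetKey_entry_role (role : String) (content : Option String) :
    pvGetKey [("role", some role), ("content", content)] "role" = some role := by
  simp [pvGetKey, List.lookup]

-- A's early-exit loop equals B's locate-then-slice on the processed tail, for any
-- carried state (rounds, prev).
theorem pvALoop_eq_cut (maxRounds : Int) (conv : List (List (String × Option String)))
    (rounds : Int) (prev : Option String) :
    pvALoop maxRounds conv rounds prev =
      (match pvFindCut maxRounds (pvProcessed conv) rounds prev with
       | none => pvProcessed conv
       | some i => (pvProcessed conv).take (i + 1)) := by
  induction conv generalizing rounds prev with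
  | nil => simp [pvALoop, pvProcessed, pvFindCut]
  | cons msg rest ih =>
    by_cases hsys : pvNormRole (pvGetKey msg "role") = "system"
    · simpa [pvALoop, pvProcessed, hsys] using ih rounds prev
    · have hproc : pvProcessed (msg :: rest)
          = [("role", some (pvNormRole (pvGetKey msg "role"))),
             ("content", pvGetKey msg "content")] :: pvProcessed rest := by
        simp [pvProcessed, hsys]
      by_cases hc : prev = some "user" ∧ pvNormRole (pvGetKey msg "role") = "assistant"
      · obtain ⟨h1, h2⟩ := hc
        by_cases hr : rounds + 1 ≥ maxRounds
        · simp [pvALoop, pvFindCut, pvGetKey_entry_role, hproc, h1, h2, hr]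
        · have hIH := ih (rounds + 1) (some "assistant")
          simp only [pvALoop, pvFindCut, pvGetKey_entry_role, hproc, h1, h2, hr]
          simp only [String.reduceEq, and_self, ite_false, ite_true]
          rw [hIH]
          cases pvFindCut maxRounds (pvProcessed rest) (rounds + 1) (some "assistant") <;>
            simp [List.take]
      · have hc' : ¬ (prev = some "user" ∧
            (some (pvNormRole (pvGetKey msg "role")) : Option String) = some "assistant") := by
          simpa using hc
        have hIH := ih rounds (some (pvNormRole (pvGetKey msg "role")))
        simp only [pvALoop, pvFindCut, pvGetKey_entry_role, hproc, if_neg hsys, if_neg hc,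
          if_neg hc']
        rw [hIH]
        cases pvFindCut maxRounds (pvProcessed rest) rounds
            (some (pvNormRole (pvGetKey msg "role"))) <;> simp [List.take]

-- ===== VERDICT (by name: the statement is the Claim_ definition above) =====
theorem slice_conversation_by_rounds_spec : Claim_equal_slice_conversation_by_rounds := by
  intro conversation max_rounds _
  unfold Spec_slice_conversation_by_rounds
  unfold slice_conversation_by_rounds slice_conversation_by_rounds_alt
  by_cases h : max_rounds ≤ 0
  · simp [h]
  · simpa [h] using pvALoop_eq_cut max_rounds conversation 0 none
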